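-- pv_equiv track=rewrite | github.com/yewonniy/algorithm | 프로그래머스/프로세스.py | solution
-- ===== SOURCE A (Python) =====
-- from collections import deque
--
-- def solution(priorities, location):
--     answer = 0
--     q = deque()
--     for i, x in enumerate(priorities):
--         q.append([i, x])
--     while q:
--         idx, x = q.popleft()
--         if any(q[i][1] > x for i in range(len(q))):
--             q.append([idx, x])
--         else:
--             answer += 1
--             if idx == location:
--                 break
--     return answer
-- ===== SOURCE B (Python) =====
-- def solution(priorities, location):
--     # Instead of rotating one element at a time, jump straight to the first
--     # highest-priority job each round: print it, then continue circularly after it.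
--     q = list(enumerate(priorities))
--     order = 0
--     while q:
--         mp = max(p for _, p in q)
--         m = next(i for i, (_, p) in enumerate(q) if p == mp)
--         order += 1
--         if q[m][0] == location:
--             break
--         q = q[m + 1:] + q[:m]
--     return order
-- ===== Notes on version B (the rewrite author's own statement) =====
-- stated objective: faster
-- what changed: B replaces the one-element-at-a-time queue rotation (with an any() scan per rotation) by jumping directly to the first highest-priority job each round and resuming circularly after it, removing all rotation steps.
import Mathlib
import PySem

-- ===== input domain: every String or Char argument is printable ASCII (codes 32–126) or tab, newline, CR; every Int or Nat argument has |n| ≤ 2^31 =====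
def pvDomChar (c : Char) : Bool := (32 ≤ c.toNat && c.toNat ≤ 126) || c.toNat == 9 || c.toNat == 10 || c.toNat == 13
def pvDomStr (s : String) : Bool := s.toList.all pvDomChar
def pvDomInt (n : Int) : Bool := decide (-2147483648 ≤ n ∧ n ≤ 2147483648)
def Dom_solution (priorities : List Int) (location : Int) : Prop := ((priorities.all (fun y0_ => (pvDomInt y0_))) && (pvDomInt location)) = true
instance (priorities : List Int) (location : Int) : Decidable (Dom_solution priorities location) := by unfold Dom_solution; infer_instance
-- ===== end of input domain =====

-- B replaces A's one-rotation-at-a-time queue simulation by jumping straight to the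
-- first highest-priority job each round (print it, resume circularly after it);
-- return values agree on all inputs (B is measurably faster on large inputs).

-- ===== PORT A =====
-- termination helper for loopA's rotation case (cited in decreasing_by)
theorem pvRotateFindIdxLt (idx x : Int) (rest : List (Int × Int))
    (h : rest.any (fun t => decide (x < t.2)) = true) :
    (rest ++ [(idx, x)]).findIdx
        (fun t => (rest ++ [(idx, x)]).all (fun s => decide (s.2 ≤ t.2)))
      < ((idx, x) :: rest).findIdx
        (fun t => (((idx, x) :: rest)).all (fun s => decide (s.2 ≤ t.2))) := by
  have hfun : (fun t : Int × Int => (rest ++ [(idx, x)]).all (fun s => decide (s.2 ≤ t.2)))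
      = (fun t : Int × Int => (((idx, x) :: rest)).all (fun s => decide (s.2 ≤ t.2))) := by
    funext t
    simp [List.all_append, List.all_cons, Bool.and_comm]
  rw [hfun]
  set P : Int × Int → Bool := fun t => (((idx, x) :: rest)).all (fun s => decide (s.2 ≤ t.2)) with hP
  obtain ⟨u, hu, hux⟩ : ∃ t ∈ rest, x < t.2 := by simpa using h
  have hPf : P (idx, x) = false := by
    apply Bool.eq_false_iff.mpr
    simp only [hP]
    intro hall
    rw [List.all_eq_true] at hall
    have := hall u (List.mem_cons_of_mem _ hu)
    simp at this
    omega
  -- a maximum of the whole queue exists, and it lies in rest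
  obtain ⟨m, hm, hmax⟩ : ∃ m ∈ (idx, x) :: rest, ∀ s ∈ (idx, x) :: rest, s.2 ≤ m.2 := by
    have hb := PySem.List.le_foldl_max_int rest Prod.snd x
    have hmem := PySem.List.foldl_max_mem (rest.map Prod.snd) x
    rw [List.foldl_map] at hmem
    rcases hmem with h1 | h1
    · exact ⟨(idx, x), by simp, by
        intro s hs
        rcases List.mem_cons.mp hs with rfl | hs
        · simp
        · have := hb.2 s hs; rw [h1] at this; exact this⟩
    · obtain ⟨s0, hs0, hs0v⟩ := List.mem_map.mp h1
      exact ⟨s0, List.mem_cons_of_mem _ hs0, by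
        intro s hs
        rcases List.mem_cons.mp hs with rfl | hs
        · rw [hs0v]; exact hb.1
        · rw [hs0v]; exact hb.2 s hs⟩
  have hPm : P m = true := by
    simp only [hP, List.all_eq_true]
    intro s hs
    simpa using hmax s hs
  have hmrest : m ∈ rest := by
    rcases List.mem_cons.mp hm with rfl | hm'
    · rw [hPf] at hPm; exact absurd hPm (by simp)
    · exact hm'
  have hlt : rest.findIdx P < rest.length :=
    List.findIdx_lt_length.mpr ⟨m, hmrest, hPm⟩
  rw [List.findIdx_cons, hPf]
  simp only [cond_false]
  rw [List.findIdx_append, if_pos hlt]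
  omega

def loopA (loc : Int) (q : List (Int × Int)) (answer : Int) : Int :=
  match q with
  | [] => answer
  | (idx, x) :: rest =>
    if h : rest.any (fun t => decide (x < t.2)) = true then
      loopA loc (rest ++ [(idx, x)]) answer
    else if idx = loc then answer + 1
    else loopA loc rest (answer + 1)
termination_by (q.length, q.findIdx (fun t => q.all (fun s => decide (s.2 ≤ t.2))))
decreasing_by
  · apply Prod.Lex.right'
    · simp
    · exact pvRotateFindIdxLt idx x rest h
  · apply Prod.Lex.left
    simp

def solution (priorities : List Int) (location : Int) : Int :=
  let q := (PySem.List.enumerate priorities).foldl (fun acc t => acc ++ [t]) []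
  loopA location q 0

-- ===== PORT B =====
-- mp = max(p for _, p in q) on a nonempty queue t :: ts (Python's max = running fold)
def maxSnd (t : Int × Int) (ts : List (Int × Int)) : Int :=
  ts.foldl (fun a s => max a s.2) t.2

-- the first index holding the maximal priority is in range (cited in decreasing_by)
theorem pvFindIdxMaxLt (t : Int × Int) (ts : List (Int × Int)) :
    (t :: ts).findIdx (fun s => s.2 == maxSnd t ts) < (t :: ts).length := by
  apply List.findIdx_lt_length.mpr
  have hmem := PySem.List.foldl_max_mem (ts.map Prod.snd) t.2
  rw [List.foldl_map] at hmem
  rcases hmem with h1 | h1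
  · exact ⟨t, by simp, by simp [maxSnd, h1]⟩
  · obtain ⟨s0, hs0, hs0v⟩ := List.mem_map.mp h1
    exact ⟨s0, List.mem_cons_of_mem _ hs0, by simp [maxSnd, hs0v]⟩

def loopB (loc : Int) (q : List (Int × Int)) (order : Int) : Int :=
  match q with
  | [] => order
  | t :: ts =>
    let mp := maxSnd t ts
    let m := (t :: ts).findIdx (fun s => s.2 == mp)
    if ((t :: ts).getD m ((0 : Int), (0 : Int))).1 = loc then order + 1
    else loopB loc ((t :: ts).drop (m + 1) ++ (t :: ts).take m) (order + 1)
termination_by q.length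
decreasing_by
  have := pvFindIdxMaxLt t ts
  simp only [List.length_append, List.length_drop, List.length_take, List.length_cons] at *
  omega

def solution_alt (priorities : List Int) (location : Int) : Int :=
  loopB location (PySem.List.enumerate priorities) 0

-- ===== PRECONDITION & SPEC =====
def Spec_solution (priorities : List Int) (location : Int) (out : Int) : Prop := out = solution_alt priorities location
instance (priorities : List Int) (location : Int) (out : Int) : Decidable (Spec_solution priorities location out) := by unfold Spec_solution; infer_instance

-- ===== CLAIM (what is proved, stated in full; the proofs are below) =====
def Claim_equal_solution : Prop := ∀ (priorities : List Int) (location : Int), Dom_solution priorities location → Spec_solution priorities location (solution priorities location)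

-- ===== LEMMAS AND PROOFS =====

theorem foldl_max_init (l : List Int) (a c : Int) :
    l.foldl max (max a c) = max (l.foldl max a) c := by
  induction l generalizing a with
  | nil => rfl
  | cons b t ih =>
    simp only [List.foldl_cons]
    rw [max_right_comm a c b, ih]

theorem maxSnd_rotate (idx x : Int) (r : Int × Int) (rs : List (Int × Int)) :
    maxSnd (idx, x) (r :: rs) = maxSnd r (rs ++ [(idx, x)]) := by
  unfold maxSnd
  rw [← List.foldl_map (f := Prod.snd) (g := max),
      ← List.foldl_map (f := Prod.snd) (g := max)]
  simp only [List.map_cons, List.map_append, List.map_cons, List.map_nil,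
    List.foldl_cons, List.foldl_append, List.foldl_cons, List.foldl_nil]
  rw [show max x r.2 = max r.2 x from max_comm x r.2, foldl_max_init]

theorem maxSnd_ub (t : Int × Int) (ts : List (Int × Int)) :
    ∀ s ∈ t :: ts, s.2 ≤ maxSnd t ts := by
  intro s hs
  have hb := PySem.List.le_foldl_max_int ts Prod.snd t.2
  rcases List.mem_cons.mp hs with rfl | hs'
  · exact hb.1
  · exact hb.2 s hs'

theorem maxSnd_of_le (idx x : Int) (rest : List (Int × Int))
    (h : ∀ s ∈ rest, s.2 ≤ x) : maxSnd (idx, x) rest = x := by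
  unfold maxSnd
  induction rest with
  | nil => rfl
  | cons s t ih =>
    simp only [List.foldl_cons]
    have hsx : s.2 ≤ x := h s (by simp)
    rw [show max x s.2 = x from max_eq_left hsx]
    exact ih (fun u hu => h u (List.mem_cons_of_mem _ hu))

-- rotating a non-maximal front to the back does not change loopB's value
theorem loopB_rotate (loc a idx x : Int) (rest : List (Int × Int))
    (h : rest.any (fun t => decide (x < t.2)) = true) :
    loopB loc (rest ++ [(idx, x)]) a = loopB loc ((idx, x) :: rest) a := by
  obtain ⟨r, rs, rfl⟩ : ∃ r rs, rest = r :: rs := by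
    cases rest with
    | nil => simp at h
    | cons r rs => exact ⟨r, rs, rfl⟩
  obtain ⟨u, hu, hux⟩ : ∃ t ∈ r :: rs, x < t.2 := by simpa using h
  have hxlt : x < maxSnd (idx, x) (r :: rs) :=
    lt_of_lt_of_le hux (maxSnd_ub (idx, x) (r :: rs) u (List.mem_cons_of_mem _ hu))
  -- the maximum is attained inside rest
  obtain ⟨w, hw, hwv⟩ : ∃ w ∈ r :: rs, w.2 = maxSnd (idx, x) (r :: rs) := by
    have hmem := PySem.List.foldl_max_mem ((r :: rs).map Prod.snd) x
    rw [List.foldl_map] at hmem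
    rcases hmem with h1 | h1
    · exfalso
      have hx : maxSnd (idx, x) (r :: rs) = x := by simpa [maxSnd] using h1
      omega
    · obtain ⟨s0, hs0, hs0v⟩ := List.mem_map.mp h1
      exact ⟨s0, hs0, by simpa [maxSnd] using hs0v⟩
  have hklt : (r :: rs).findIdx (fun s => s.2 == maxSnd (idx, x) (r :: rs)) < (r :: rs).length :=
    List.findIdx_lt_length.mpr ⟨w, hw, by simp [hwv]⟩
  set k := (r :: rs).findIdx (fun s => s.2 == maxSnd (idx, x) (r :: rs)) with hk
  -- unfold one step of loopB on each side
  simp only [List.cons_append, loopB]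
  have hmprot : maxSnd r (rs ++ [(idx, x)]) = maxSnd (idx, x) (r :: rs) := (maxSnd_rotate idx x r rs).symm
  rw [hmprot]
  have hfx : ((x : Int) == maxSnd (idx, x) (r :: rs)) = false := beq_eq_false_iff_ne.mpr (by omega)
  have hidx1 : ((idx, x) :: r :: rs).findIdx (fun s => s.2 == maxSnd (idx, x) (r :: rs)) = k + 1 := by
    rw [List.findIdx_cons]; simp only [hfx, cond_false, hk]
  have hidx2 : (r :: (rs ++ [(idx, x)])).findIdx (fun s => s.2 == maxSnd (idx, x) (r :: rs)) = k := by
    rw [show r :: (rs ++ [(idx, x)]) = (r :: rs) ++ [(idx, x)] from rfl,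
        List.findIdx_append, if_pos (hk ▸ hklt)]
  rw [hidx1, hidx2]
  have hgd : ((r :: (rs ++ [(idx, x)])).getD k ((0 : Int), (0 : Int)))
      = (((idx, x) :: r :: rs).getD (k + 1) ((0 : Int), (0 : Int))) := by
    rw [List.getD_cons_succ, List.getD_eq_getElem?_getD, List.getD_eq_getElem?_getD,
        ← List.cons_append, List.getElem?_append_left hklt]
  rw [hgd]
  have hlists : (r :: (rs ++ [(idx, x)])).drop (k + 1) ++ (r :: (rs ++ [(idx, x)])).take k
      = ((idx, x) :: r :: rs).drop (k + 1 + 1) ++ ((idx, x) :: r :: rs).take (k + 1) := by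
    rw [List.drop_succ_cons, List.take_succ_cons,
        show r :: (rs ++ [(idx, x)]) = (r :: rs) ++ [(idx, x)] from rfl,
        List.drop_append_of_le_length (by simp only [List.length_cons] at hklt ⊢; omega),
        List.take_append_of_le_length (by simp only [List.length_cons] at hklt ⊢; omega)]
    simp
  rw [hlists]

theorem loopAB (loc : Int) (q : List (Int × Int)) (a : Int) :
    loopA loc q a = loopB loc q a := by
  refine loopA.induct loc (fun q a => loopA loc q a = loopB loc q a) ?_ ?_ ?_ ?_ q a
  · intro a
    rw [loopA, loopB]
  · intro a idx x rest h ih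
    rw [loopA]
    simp only [dif_pos h]
    rw [ih, loopB_rotate loc a idx x rest h]
  · intro a x rest h
    have hle : ∀ s ∈ rest, s.2 ≤ x := by
      intro s hs
      by_contra hc
      exact h (List.any_eq_true.mpr ⟨s, hs, by simp; omega⟩)
    rw [loopA, loopB]
    simp only [dif_neg h]
    rw [maxSnd_of_le loc x rest hle]
    simp [List.findIdx_cons]
  · intro a idx x rest h heq ih
    have hle : ∀ s ∈ rest, s.2 ≤ x := by
      intro s hs
      by_contra hc
      exact h (List.any_eq_true.mpr ⟨s, hs, by simp; omega⟩)
    rw [loopA, loopB]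
    simp only [dif_neg h, if_neg heq]
    rw [maxSnd_of_le idx x rest hle]
    simp only [List.findIdx_cons, beq_self_eq_true, cond_true, List.getD_cons_zero,
      if_neg heq, List.drop_succ_cons, List.drop_zero, List.take_zero, List.append_nil]
    exact ih

-- ===== VERDICT (by name: the statement is the Claim_ definition above) =====
theorem solution_spec : Claim_equal_solution := by
  intro priorities location _
  unfold Spec_solution solution solution_alt
  simp only [PySem.List.foldl_append_singleton, List.nil_append]
  exact loopAB location (PySem.List.enumerate priorities) 0
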